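-- pv_equiv track=rewrite | github.com/Patevansh/Python | PFSD/uppertolower.py | uppertolower
-- ===== SOURCE A (Python) =====
-- def uppertolower(s):
--     k=""
--     for i in s:
--         if i in "AEIOU":
--             k+=i
--         else:
--             k+=i.lower()
--     return k
-- ===== SOURCE B (Python) =====
-- def uppertolower(s):
--     # Build a translation table from the characters actually present in s:
--     # every non-"AEIOU" character maps to its lowercase form; uppercase vowels
--     # are absent from the table and therefore pass through unchanged.
--     table = {ord(c): c.lower() for c in set(s) if c not in "AEIOU"}
--     return s.translate(table)
-- ===== Notes on version B (the rewrite author's own statement) =====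
-- stated objective: idiomatic
-- what changed: Replaces the per-character loop with string concatenation by building a translation table (dict keyed on the distinct characters of s, uppercase vowels omitted) once and applying str.translate in one C-level pass.
import Mathlib
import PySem

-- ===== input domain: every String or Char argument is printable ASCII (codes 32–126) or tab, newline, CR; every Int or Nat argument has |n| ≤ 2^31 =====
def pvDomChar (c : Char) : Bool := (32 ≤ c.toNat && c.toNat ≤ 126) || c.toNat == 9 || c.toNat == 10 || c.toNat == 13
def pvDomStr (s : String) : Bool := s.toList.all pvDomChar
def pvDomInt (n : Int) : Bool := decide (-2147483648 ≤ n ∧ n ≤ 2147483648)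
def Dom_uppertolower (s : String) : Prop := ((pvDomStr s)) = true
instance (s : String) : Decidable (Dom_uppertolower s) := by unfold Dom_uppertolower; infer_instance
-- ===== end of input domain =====

-- B replaces A's per-character accumulation loop by building a translation table
-- (keyed on the distinct characters of s, uppercase vowels omitted) once and
-- applying it in one pass (str.translate); objective: idiomatic.

-- ===== PORT A =====
-- 'i in "AEIOU"' on the single character i is exactly char membership in the vowel list.
def uppertolower (s : String) : String :=
  String.mk (s.toList.foldl (fun k i =>
    if ['A','E','I','O','U'].contains i then k ++ [i]
    else k ++ PySem.Chars.lower [i]) [])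

-- ===== PORT B =====
-- table = {ord(c): c.lower() for c in set(s) if c not in "AEIOU"}  (dict keyed by the char;
-- its contents are order-independent, so consuming the PySem.Set here is exact)
def uppertolower_table (s : String) : PySem.Dict Char (List Char) :=
  (PySem.Set.ofList s.toList).foldl (fun d c =>
    if ['A','E','I','O','U'].contains c then d
    else d.insert c (PySem.Chars.lower [c])) PySem.Dict.empty

-- s.translate(table): each char replaced by its table entry, untouched if absent
def uppertolower_alt (s : String) : String :=
  String.mk (s.toList.flatMap (fun c => (uppertolower_table s).getD c [c]))

-- ===== PRECONDITION & SPEC =====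
def Spec_uppertolower (s : String) (out : String) : Prop := out = uppertolower_alt s
instance (s : String) (out : String) : Decidable (Spec_uppertolower s out) := by unfold Spec_uppertolower; infer_instance

-- ===== CLAIM (what is proved, stated in full; the proofs are below) =====
def Claim_equal_uppertolower : Prop := ∀ (s : String), Dom_uppertolower s → Spec_uppertolower s (uppertolower s)

-- ===== LEMMAS AND PROOFS =====

-- the table's fold step
def utlStep (d : PySem.Dict Char (List Char)) (c : Char) : PySem.Dict Char (List Char) :=
  if ['A','E','I','O','U'].contains c then d else d.insert c (PySem.Chars.lower [c])

lemma utlTable_eq (s : String) :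
    uppertolower_table s = (PySem.Set.ofList s.toList).foldl utlStep PySem.Dict.empty := rfl

-- a vowel is never a key
lemma utl_get_vowel (l : List Char) (d : PySem.Dict Char (List Char)) (c : Char)
    (hv : ['A','E','I','O','U'].contains c = true) (h : d.get? c = none) :
    (l.foldl utlStep d).get? c = none := by
  induction l generalizing d with
  | nil => exact h
  | cons x xs ih =>
    simp only [List.foldl_cons]
    apply ih
    unfold utlStep
    split_ifs with hx
    · exact h
    · rw [PySem.Dict.get?_insert_of_ne]
      · exact h
      · intro hcx; subst hcx; exact hx hv

-- once a key holds its lowercase value, it keeps it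
lemma utl_get_stable (l : List Char) (d : PySem.Dict Char (List Char)) (c : Char)
    (h : d.get? c = some (PySem.Chars.lower [c])) :
    (l.foldl utlStep d).get? c = some (PySem.Chars.lower [c]) := by
  induction l generalizing d with
  | nil => exact h
  | cons x xs ih =>
    simp only [List.foldl_cons]
    apply ih
    unfold utlStep
    split_ifs with hx
    · exact h
    · by_cases hcx : c = x
      · subst hcx; exact PySem.Dict.get?_insert_self d c _
      · rw [PySem.Dict.get?_insert_of_ne _ _ hcx]; exact h

-- a non-vowel present in l gets its lowercase value
lemma utl_get_mem (l : List Char) (d : PySem.Dict Char (List Char)) (c : Char)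
    (hv : ['A','E','I','O','U'].contains c = false) (hm : c ∈ l) :
    (l.foldl utlStep d).get? c = some (PySem.Chars.lower [c]) := by
  induction l generalizing d with
  | nil => cases hm
  | cons x xs ih =>
    simp only [List.foldl_cons]
    rcases List.mem_cons.mp hm with hcx | hmem
    · subst hcx
      by_cases hx : c ∈ xs
      · exact ih _ hx
      · apply utl_get_stable
        unfold utlStep
        rw [if_neg (by simpa using hv)]
        exact PySem.Dict.get?_insert_self d c _
    · exact ih _ hmem

-- the table lookup at a char of s equals A's branch result
lemma utl_lookup (s : String) (c : Char) (hc : c ∈ s.toList) :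
    (uppertolower_table s).getD c [c] =
      (if ['A','E','I','O','U'].contains c then [c] else PySem.Chars.lower [c]) := by
  rw [utlTable_eq]
  by_cases hv : ['A','E','I','O','U'].contains c = true
  · rw [if_pos hv]
    apply PySem.Dict.getD_of_get?_eq_none
    exact utl_get_vowel _ _ _ hv (PySem.Dict.get?_empty c)
  · rw [if_neg hv]
    apply PySem.Dict.getD_of_get?_eq_some
    exact utl_get_mem _ _ _ (by simpa using hv)
      ((PySem.Set.mem_ofList _ _ ).mpr hc)

-- A's foldl with appends is a flatMap
lemma utl_foldl_flatMap (l : List Char) (acc : List Char) :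
    l.foldl (fun k i =>
      if ['A','E','I','O','U'].contains i then k ++ [i]
      else k ++ PySem.Chars.lower [i]) acc
    = acc ++ l.flatMap (fun i =>
        if ['A','E','I','O','U'].contains i then [i] else PySem.Chars.lower [i]) := by
  induction l generalizing acc with
  | nil => simp
  | cons x xs ih =>
    simp only [List.foldl_cons, List.flatMap_cons, ih]
    split_ifs <;> simp

-- flatMap respects pointwise equality on members
lemma utl_flatMap_congr {α β : Type} (l : List α) (f g : α → List β)
    (h : ∀ x ∈ l, f x = g x) : l.flatMap f = l.flatMap g := by
  induction l with
  | nil => rfl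
  | cons x xs ih =>
    simp only [List.flatMap_cons]
    rw [h x (List.mem_cons_self ..), ih (fun y hy => h y (List.mem_cons_of_mem _ hy))]

-- ===== VERDICT (by name: the statement is the Claim_ definition above) =====
theorem uppertolower_spec : Claim_equal_uppertolower := by
  intro s _
  unfold Spec_uppertolower uppertolower uppertolower_alt
  rw [utl_foldl_flatMap]
  simp only [List.nil_append]
  congr 1
  exact (utl_flatMap_congr _ _ _ (fun c hc => utl_lookup s c hc)).symm
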